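-- pv_equiv track=rewrite | github.com/YashPathak94/pythonmail | nsgroup.py | group_namespaces_by_suffix
-- ===== SOURCE A (Python) =====
-- def group_namespaces_by_suffix(namespaces, env):
--     """
--     Group namespaces by common suffix based on the environment.
--     Handles different suffixes for intg, prod, accp, and dev environments.
--     """
--     grouped_namespaces = {
--         'dev': [], 'devb': [], 'devc': [], 'intgb': [], 'intgc': [],
--         'proda': [], 'prodp': [], 'accp': [], 'accpb': [], 'accpc': [],
--         'idev': [], 'other': []
--     }
--
--     for ns in namespaces:
--         if env == 'dev':
--             if ns.endswith('dev'):
--                 grouped_namespaces['dev'].append(ns)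
--             elif ns.endswith('devb'):
--                 grouped_namespaces['devb'].append(ns)
--             elif ns.endswith('devc'):
--                 grouped_namespaces['devc'].append(ns)
--             else:
--                 grouped_namespaces['other'].append(ns)
--         elif env == 'intg':
--             if ns.endswith('intgb'):
--                 grouped_namespaces['intgb'].append(ns)
--             elif ns.endswith('intgc'):
--                 grouped_namespaces['intgc'].append(ns)
--             else:
--                 grouped_namespaces['other'].append(ns)
--         elif env == 'prod':
--             if ns.endswith('proda'):
--                 grouped_namespaces['proda'].append(ns)
--             elif ns.endswith('prodp'):
--                 grouped_namespaces['prodp'].append(ns)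
--             else:
--                 grouped_namespaces['other'].append(ns)
--         elif env == 'accp':
--             if ns.endswith('accp'):
--                 grouped_namespaces['accp'].append(ns)
--             elif ns.endswith('accpb'):
--                 grouped_namespaces['accpb'].append(ns)
--             elif ns.endswith('accpc'):
--                 grouped_namespaces['accpc'].append(ns)
--             else:
--                 grouped_namespaces['other'].append(ns)
--         elif env == 'idev':
--             grouped_namespaces['idev'].append(ns)  # idev has no suffix, treat it separately
--         else:
--             grouped_namespaces['other'].append(ns)
--
--     return grouped_namespaces
-- ===== SOURCE B (Python) =====
-- _KEYS = ['dev', 'devb', 'devc', 'intgb', 'intgc', 'proda', 'prodp',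
--          'accp', 'accpb', 'accpc', 'idev', 'other']
--
-- _ENV_SUFFIXES = {'dev': ['dev', 'devb', 'devc'],
--                  'intg': ['intgb', 'intgc'],
--                  'prod': ['proda', 'prodp'],
--                  'accp': ['accp', 'accpb', 'accpc']}
--
--
-- def group_namespaces_by_suffix(namespaces, env):
--     # Staged passes: one filter pass per bucket instead of classifying each
--     # item once.  Correct because within an environment the suffixes are
--     # mutually exclusive (they differ in their final character), so each
--     # namespace passes at most one of the per-bucket filters.
--     result = {k: [] for k in _KEYS}
--     if env == 'idev':
--         result['idev'] = list(namespaces)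
--         return result
--     suffixes = _ENV_SUFFIXES.get(env, [])
--     for s in suffixes:
--         result[s] = [ns for ns in namespaces if ns.endswith(s)]
--     result['other'] = [ns for ns in namespaces
--                        if not any(ns.endswith(s) for s in suffixes)]
--     return result
-- ===== Notes on version B (the rewrite author's own statement) =====
-- stated objective: alternative
-- what changed: Replaces A's single loop that classifies each namespace through nested env/suffix branch chains by staged passes: one filter pass per bucket of the selected environment plus a final no-match filter for 'other' (correct because the suffixes within an environment are mutually exclusive), with 'idev' as a loop-free catch-all.
import Mathlib
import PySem

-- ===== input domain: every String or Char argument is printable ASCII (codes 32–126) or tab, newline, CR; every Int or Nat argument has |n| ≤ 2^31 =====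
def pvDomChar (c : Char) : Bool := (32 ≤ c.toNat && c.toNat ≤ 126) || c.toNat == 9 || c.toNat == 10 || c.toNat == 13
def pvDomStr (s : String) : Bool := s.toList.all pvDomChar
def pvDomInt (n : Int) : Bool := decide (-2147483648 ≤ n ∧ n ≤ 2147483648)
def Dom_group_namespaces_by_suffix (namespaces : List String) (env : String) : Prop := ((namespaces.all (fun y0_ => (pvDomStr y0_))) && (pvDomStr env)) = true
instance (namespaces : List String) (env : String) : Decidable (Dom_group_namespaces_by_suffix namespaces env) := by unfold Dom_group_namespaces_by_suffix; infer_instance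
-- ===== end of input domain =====

-- B replaces A's single classification loop (nested env/suffix branch chains per item)
-- by staged passes: one filter pass per bucket of the selected environment plus a final
-- no-match pass for 'other'; correct because an environment's suffixes are mutually
-- exclusive (objective: alternative). Return value only.

-- ===== PORT A =====
def group_namespaces_by_suffix (namespaces : List String) (env : String) : List (String × List String) :=
  let init : PySem.Dict String (List String) := PySem.Dict.ofList
    [("dev", []), ("devb", []), ("devc", []), ("intgb", []), ("intgc", []),
     ("proda", []), ("prodp", []), ("accp", []), ("accpb", []), ("accpc", []),
     ("idev", []), ("other", [])]
  let grouped := namespaces.foldl (fun d ns =>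
    if env == "dev" then
      if PySem.Str.endswith ns "dev" then d.modify "dev" [] (· ++ [ns])
      else if PySem.Str.endswith ns "devb" then d.modify "devb" [] (· ++ [ns])
      else if PySem.Str.endswith ns "devc" then d.modify "devc" [] (· ++ [ns])
      else d.modify "other" [] (· ++ [ns])
    else if env == "intg" then
      if PySem.Str.endswith ns "intgb" then d.modify "intgb" [] (· ++ [ns])
      else if PySem.Str.endswith ns "intgc" then d.modify "intgc" [] (· ++ [ns])
      else d.modify "other" [] (· ++ [ns])
    else if env == "prod" then
      if PySem.Str.endswith ns "proda" then d.modify "proda" [] (· ++ [ns])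
      else if PySem.Str.endswith ns "prodp" then d.modify "prodp" [] (· ++ [ns])
      else d.modify "other" [] (· ++ [ns])
    else if env == "accp" then
      if PySem.Str.endswith ns "accp" then d.modify "accp" [] (· ++ [ns])
      else if PySem.Str.endswith ns "accpb" then d.modify "accpb" [] (· ++ [ns])
      else if PySem.Str.endswith ns "accpc" then d.modify "accpc" [] (· ++ [ns])
      else d.modify "other" [] (· ++ [ns])
    else if env == "idev" then d.modify "idev" [] (· ++ [ns])
    else d.modify "other" [] (· ++ [ns])) init
  grouped.items

-- ===== PORT B =====
def pvKeys : List String :=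
  ["dev", "devb", "devc", "intgb", "intgc", "proda", "prodp",
   "accp", "accpb", "accpc", "idev", "other"]

def pvEnvSuffixes : PySem.Dict String (List String) :=
  PySem.Dict.ofList
    [("dev",  ["dev", "devb", "devc"]),
     ("intg", ["intgb", "intgc"]),
     ("prod", ["proda", "prodp"]),
     ("accp", ["accp", "accpb", "accpc"])]

def group_namespaces_by_suffix_alt (namespaces : List String) (env : String) : List (String × List String) :=
  let result : PySem.Dict String (List String) :=
    PySem.Dict.ofList (pvKeys.map (fun k => (k, ([] : List String))))
  if env == "idev" then (result.insert "idev" namespaces).items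
  else
    let suffixes := pvEnvSuffixes.getD env []
    let result := suffixes.foldl
      (fun d s => d.insert s (namespaces.filter (fun ns => PySem.Str.endswith ns s))) result
    (result.insert "other"
      (namespaces.filter (fun ns => !(suffixes.any (fun s => PySem.Str.endswith ns s))))).items

-- ===== PRECONDITION & SPEC =====
def Spec_group_namespaces_by_suffix (namespaces : List String) (env : String) (out : List (String × List String)) : Prop := out = group_namespaces_by_suffix_alt namespaces env
instance (namespaces : List String) (env : String) (out : List (String × List String)) : Decidable (Spec_group_namespaces_by_suffix namespaces env out) := by unfold Spec_group_namespaces_by_suffix; infer_instance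

-- ===== CLAIM (what is proved, stated in full; the proofs are below) =====
def Claim_equal_group_namespaces_by_suffix : Prop := ∀ (namespaces : List String) (env : String), Dom_group_namespaces_by_suffix namespaces env → Spec_group_namespaces_by_suffix namespaces env (group_namespaces_by_suffix namespaces env)

-- ===== LEMMAS AND PROOFS =====

-- the shared 12-key all-empty initial dict
def pvInit : PySem.Dict String (List String) :=
  PySem.Dict.ofList (pvKeys.map (fun k => (k, ([] : List String))))

-- A's per-item classification for each known environment, as a bucket-name function
def pvClsDev (ns : String) : String :=
  if PySem.Str.endswith ns "dev" then "dev"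
  else if PySem.Str.endswith ns "devb" then "devb"
  else if PySem.Str.endswith ns "devc" then "devc"
  else "other"

def pvClsIntg (ns : String) : String :=
  if PySem.Str.endswith ns "intgb" then "intgb"
  else if PySem.Str.endswith ns "intgc" then "intgc"
  else "other"

def pvClsProd (ns : String) : String :=
  if PySem.Str.endswith ns "proda" then "proda"
  else if PySem.Str.endswith ns "prodp" then "prodp"
  else "other"

def pvClsAccp (ns : String) : String :=
  if PySem.Str.endswith ns "accp" then "accp"
  else if PySem.Str.endswith ns "accpb" then "accpb"
  else if PySem.Str.endswith ns "accpc" then "accpc"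
  else "other"

-- two suffixes with different final characters cannot both be suffixes of ns
lemma pv_excl (ns p q : String) (hp0 : p.toList ≠ []) (hq0 : q.toList ≠ [])
    (h : p.toList.getLast? ≠ q.toList.getLast?)
    (hp : PySem.Str.endswith ns p = true) (hq : PySem.Str.endswith ns q = true) : False := by
  rw [PySem.Str.endswith_eq, PySem.Chars.endswith_iff] at hp hq
  obtain ⟨tp, htp⟩ := hp
  obtain ⟨tq, htq⟩ := hq
  apply h
  have e1 : ns.toList.getLast? = p.toList.getLast? := by
    rw [← htp, List.getLast?_append]
    cases hl : p.toList.getLast? with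
    | none => exact absurd (List.getLast?_eq_none_iff.mp hl) hp0
    | some c => rfl
  have e2 : ns.toList.getLast? = q.toList.getLast? := by
    rw [← htq, List.getLast?_append]
    cases hl : q.toList.getLast? with
    | none => exact absurd (List.getLast?_eq_none_iff.mp hl) hq0
    | some c => rfl
  rw [← e1, ← e2]

lemma pv_foldl_items_congr (f g : PySem.Dict String (List String) → String → PySem.Dict String (List String))
    (h : ∀ d x, f d x = g d x) (init : PySem.Dict String (List String)) (l : List String) :
    (l.foldl f init).items = (l.foldl g init).items := by
  have : f = g := funext fun d => funext fun x => h d x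
  rw [this]

lemma pv_keys_foldl (cls : String → String) (l : List String) (d : PySem.Dict String (List String))
    (h : ∀ ns, d.contains (cls ns) = true) :
    (l.foldl (fun d ns => d.modify (cls ns) [] (· ++ [ns])) d).keys = d.keys := by
  induction l generalizing d with
  | nil => rfl
  | cons x xs ih =>
    simp only [List.foldl_cons]
    rw [ih]
    · rw [PySem.Dict.keys_modify, PySem.Dict.keys_insert_of_contains _ _ (h x)]
    · intro ns
      rw [PySem.Dict.contains_modify]
      simp [h ns]

lemma pv_getD_foldl (cls : String → String) (l : List String)
    (d : PySem.Dict String (List String)) (c : String) :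
    (l.foldl (fun d ns => d.modify (cls ns) [] (· ++ [ns])) d).getD c []
      = d.getD c [] ++ l.filter (fun ns => cls ns == c) := by
  induction l generalizing d with
  | nil => simp
  | cons x xs ih =>
    simp only [List.foldl_cons, List.filter_cons]
    rw [ih]
    by_cases h : cls x = c
    · subst h
      rw [PySem.Dict.getD_modify_self]
      simp
    · rw [PySem.Dict.getD_modify_of_ne _ _ _ (fun hc => h hc.symm)]
      simp [h]

set_option maxHeartbeats 1000000 in
lemma pvInitB_eq : PySem.Dict.ofList (pvKeys.map (fun k => (k, ([] : List String))))
    = PySem.Dict.mk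
    [("dev", []), ("devb", []), ("devc", []), ("intgb", []), ("intgc", []),
     ("proda", []), ("prodp", []), ("accp", []), ("accpb", []), ("accpc", []),
     ("idev", []), ("other", [])] := by decide

lemma pvInit_getD (k : String) : pvInit.getD k [] = [] := by
  unfold pvInit
  rw [pvInitB_eq]
  simp only [PySem.Dict.getD, PySem.Dict.get?, List.find?]
  (repeat' split) <;> rfl

-- characterization of A's bucketing loop: each key holds the namespaces classified to it
lemma pvA_char (cls : String → String) (hcls : ∀ ns, pvInit.contains (cls ns) = true)
    (l : List String) :
    (l.foldl (fun d ns => d.modify (cls ns) [] (· ++ [ns])) pvInit).items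
      = pvKeys.map (fun k => (k, l.filter (fun ns => cls ns == k))) := by
  have hkeys := pv_keys_foldl cls l pvInit hcls
  have hik : pvInit.keys = pvKeys := by decide
  rw [PySem.Dict.items_eq_map_keys _ (by rw [hkeys, hik]; decide) ([] : List String),
      hkeys, hik]
  apply List.map_congr_left
  intro k _
  rw [pv_getD_foldl, pvInit_getD, List.nil_append]

lemma pvInitA_eq : (PySem.Dict.ofList
    [("dev", []), ("devb", []), ("devc", []), ("intgb", []), ("intgc", []),
     ("proda", []), ("prodp", []), ("accp", []), ("accpb", []), ("accpc", []),
     ("idev", []), ("other", [])] : PySem.Dict String (List String)) = pvInit := by decide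

lemma pvA_dev (l : List String) :
    group_namespaces_by_suffix l "dev"
      = pvKeys.map (fun k => (k, l.filter (fun ns => pvClsDev ns == k))) := by
  unfold group_namespaces_by_suffix
  simp only [pvInitA_eq, String.reduceBEq, beq_self_eq_true, if_true, Bool.false_eq_true, if_false]
  rw [← pvA_char pvClsDev (fun ns => by unfold pvClsDev; split_ifs <;> decide) l]
  exact pv_foldl_items_congr _ _ (fun d x => by unfold pvClsDev; split_ifs <;> rfl) _ _

lemma pv_excl2 (p q : String) (hp0 : p.toList ≠ []) (hq0 : q.toList ≠ [])
    (h : p.toList.getLast? ≠ q.toList.getLast?) (ns : String)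
    (hp : PySem.Str.endswith ns p = true) : PySem.Str.endswith ns q = false := by
  by_contra hc
  exact pv_excl ns p q hp0 hq0 h hp (by simpa using hc)

lemma pv_case_dev (l : List String) :
    group_namespaces_by_suffix l "dev" = group_namespaces_by_suffix_alt l "dev" := by
  rw [pvA_dev]
  unfold group_namespaces_by_suffix_alt
  simp only [String.reduceBEq, Bool.false_eq_true, if_false]
  rw [pvInitB_eq, show pvEnvSuffixes.getD "dev" [] = ["dev", "devb", "devc"] from by decide]
  simp [PySem.Dict.insert, PySem.Dict.contains, List.foldl]
  simp only [pvKeys, List.map]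
  have z : ∀ k : String, ("dev" == k) = false → ("devb" == k) = false → ("devc" == k) = false →
      ("other" == k) = false → List.filter (fun ns => pvClsDev ns == k) l = [] := by
    intro k a b c d
    refine List.filter_eq_nil_iff.mpr (fun ns _ => ?_)
    unfold pvClsDev
    split_ifs <;> simp [a, b, c, d]
  have c1 : List.filter (fun ns => pvClsDev ns == "dev") l
      = List.filter (fun ns => PySem.Str.endswith ns "dev") l := by
    refine List.filter_congr (fun ns _ => ?_)
    unfold pvClsDev
    split_ifs <;> simp_all
  have c2 : List.filter (fun ns => pvClsDev ns == "devb") l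
      = List.filter (fun ns => PySem.Str.endswith ns "devb") l := by
    refine List.filter_congr (fun ns _ => ?_)
    unfold pvClsDev
    cases h1 : PySem.Str.endswith ns "dev" with
    | true =>
      have hx := pv_excl2 "dev" "devb" (by decide) (by decide) (by decide) ns h1
      simp_all
    | false =>
      cases h2 : PySem.Str.endswith ns "devb" with
      | true => simp
      | false => split_ifs <;> simp_all
  have c3 : List.filter (fun ns => pvClsDev ns == "devc") l
      = List.filter (fun ns => PySem.Str.endswith ns "devc") l := by
    refine List.filter_congr (fun ns _ => ?_)
    unfold pvClsDev
    cases h1 : PySem.Str.endswith ns "dev" with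
    | true =>
      have hx := pv_excl2 "dev" "devc" (by decide) (by decide) (by decide) ns h1
      simp_all
    | false =>
      cases h2 : PySem.Str.endswith ns "devb" with
      | true =>
        have hx := pv_excl2 "devb" "devc" (by decide) (by decide) (by decide) ns h2
        simp_all
      | false => split_ifs <;> simp_all
  have c4 : List.filter (fun ns => pvClsDev ns == "other") l
      = List.filter (fun ns => !PySem.Str.endswith ns "dev" &&
          (!PySem.Str.endswith ns "devb" && !PySem.Str.endswith ns "devc")) l := by
    refine List.filter_congr (fun ns _ => ?_)
    unfold pvClsDev
    split_ifs <;> simp_all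
  rw [c1, c2, c3, c4, z "intgb" (by decide) (by decide) (by decide) (by decide),
      z "intgc" (by decide) (by decide) (by decide) (by decide),
      z "proda" (by decide) (by decide) (by decide) (by decide),
      z "prodp" (by decide) (by decide) (by decide) (by decide),
      z "accp" (by decide) (by decide) (by decide) (by decide),
      z "accpb" (by decide) (by decide) (by decide) (by decide),
      z "accpc" (by decide) (by decide) (by decide) (by decide),
      z "idev" (by decide) (by decide) (by decide) (by decide)]
  simp

lemma pvA_intg (l : List String) :
    group_namespaces_by_suffix l "intg"
      = pvKeys.map (fun k => (k, l.filter (fun ns => pvClsIntg ns == k))) := by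
  unfold group_namespaces_by_suffix
  simp only [pvInitA_eq, String.reduceBEq, beq_self_eq_true, if_true, Bool.false_eq_true, if_false]
  rw [← pvA_char pvClsIntg (fun ns => by unfold pvClsIntg; split_ifs <;> decide) l]
  exact pv_foldl_items_congr _ _ (fun d x => by unfold pvClsIntg; split_ifs <;> rfl) _ _

lemma pv_case_intg (l : List String) :
    group_namespaces_by_suffix l "intg" = group_namespaces_by_suffix_alt l "intg" := by
  rw [pvA_intg]
  unfold group_namespaces_by_suffix_alt
  simp only [String.reduceBEq, Bool.false_eq_true, if_false]
  rw [pvInitB_eq, show pvEnvSuffixes.getD "intg" [] = ["intgb", "intgc"] from by decide]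
  simp [PySem.Dict.insert, PySem.Dict.contains, List.foldl]
  simp only [pvKeys, List.map]
  have z : ∀ k : String, ("intgb" == k) = false → ("intgc" == k) = false → ("other" == k) = false →
      List.filter (fun ns => pvClsIntg ns == k) l = [] := by
    intro k a b c
    refine List.filter_eq_nil_iff.mpr (fun ns _ => ?_)
    unfold pvClsIntg
    split_ifs <;> simp [a, b, c]
  have c1 : List.filter (fun ns => pvClsIntg ns == "intgb") l
      = List.filter (fun ns => PySem.Str.endswith ns "intgb") l := by
    refine List.filter_congr (fun ns _ => ?_)
    unfold pvClsIntg
    split_ifs <;> simp_all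
  have c2 : List.filter (fun ns => pvClsIntg ns == "intgc") l
      = List.filter (fun ns => PySem.Str.endswith ns "intgc") l := by
    refine List.filter_congr (fun ns _ => ?_)
    unfold pvClsIntg
    cases h1 : PySem.Str.endswith ns "intgb" with
    | true =>
      have hx := pv_excl2 "intgb" "intgc" (by decide) (by decide) (by decide) ns h1
      simp_all
    | false =>
      split_ifs <;> simp_all
  have co : List.filter (fun ns => pvClsIntg ns == "other") l
      = List.filter (fun ns => (!PySem.Str.endswith ns "intgb" && !PySem.Str.endswith ns "intgc")) l := by
    refine List.filter_congr (fun ns _ => ?_)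
    unfold pvClsIntg
    split_ifs <;> simp_all
  rw [c1, c2, co, z "dev" (by decide) (by decide) (by decide), z "devb" (by decide) (by decide) (by decide), z "devc" (by decide) (by decide) (by decide), z "proda" (by decide) (by decide) (by decide), z "prodp" (by decide) (by decide) (by decide), z "accp" (by decide) (by decide) (by decide), z "accpb" (by decide) (by decide) (by decide), z "accpc" (by decide) (by decide) (by decide), z "idev" (by decide) (by decide) (by decide)]
  simp

lemma pvA_prod (l : List String) :
    group_namespaces_by_suffix l "prod"
      = pvKeys.map (fun k => (k, l.filter (fun ns => pvClsProd ns == k))) := by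
  unfold group_namespaces_by_suffix
  simp only [pvInitA_eq, String.reduceBEq, beq_self_eq_true, if_true, Bool.false_eq_true, if_false]
  rw [← pvA_char pvClsProd (fun ns => by unfold pvClsProd; split_ifs <;> decide) l]
  exact pv_foldl_items_congr _ _ (fun d x => by unfold pvClsProd; split_ifs <;> rfl) _ _

lemma pv_case_prod (l : List String) :
    group_namespaces_by_suffix l "prod" = group_namespaces_by_suffix_alt l "prod" := by
  rw [pvA_prod]
  unfold group_namespaces_by_suffix_alt
  simp only [String.reduceBEq, Bool.false_eq_true, if_false]
  rw [pvInitB_eq, show pvEnvSuffixes.getD "prod" [] = ["proda", "prodp"] from by decide]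
  simp [PySem.Dict.insert, PySem.Dict.contains, List.foldl]
  simp only [pvKeys, List.map]
  have z : ∀ k : String, ("proda" == k) = false → ("prodp" == k) = false → ("other" == k) = false →
      List.filter (fun ns => pvClsProd ns == k) l = [] := by
    intro k a b c
    refine List.filter_eq_nil_iff.mpr (fun ns _ => ?_)
    unfold pvClsProd
    split_ifs <;> simp [a, b, c]
  have c1 : List.filter (fun ns => pvClsProd ns == "proda") l
      = List.filter (fun ns => PySem.Str.endswith ns "proda") l := by
    refine List.filter_congr (fun ns _ => ?_)
    unfold pvClsProd
    split_ifs <;> simp_all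
  have c2 : List.filter (fun ns => pvClsProd ns == "prodp") l
      = List.filter (fun ns => PySem.Str.endswith ns "prodp") l := by
    refine List.filter_congr (fun ns _ => ?_)
    unfold pvClsProd
    cases h1 : PySem.Str.endswith ns "proda" with
    | true =>
      have hx := pv_excl2 "proda" "prodp" (by decide) (by decide) (by decide) ns h1
      simp_all
    | false =>
      split_ifs <;> simp_all
  have co : List.filter (fun ns => pvClsProd ns == "other") l
      = List.filter (fun ns => (!PySem.Str.endswith ns "proda" && !PySem.Str.endswith ns "prodp")) l := by
    refine List.filter_congr (fun ns _ => ?_)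
    unfold pvClsProd
    split_ifs <;> simp_all
  rw [c1, c2, co, z "dev" (by decide) (by decide) (by decide), z "devb" (by decide) (by decide) (by decide), z "devc" (by decide) (by decide) (by decide), z "intgb" (by decide) (by decide) (by decide), z "intgc" (by decide) (by decide) (by decide), z "accp" (by decide) (by decide) (by decide), z "accpb" (by decide) (by decide) (by decide), z "accpc" (by decide) (by decide) (by decide), z "idev" (by decide) (by decide) (by decide)]
  simp

lemma pvA_accp (l : List String) :
    group_namespaces_by_suffix l "accp"
      = pvKeys.map (fun k => (k, l.filter (fun ns => pvClsAccp ns == k))) := by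
  unfold group_namespaces_by_suffix
  simp only [pvInitA_eq, String.reduceBEq, beq_self_eq_true, if_true, Bool.false_eq_true, if_false]
  rw [← pvA_char pvClsAccp (fun ns => by unfold pvClsAccp; split_ifs <;> decide) l]
  exact pv_foldl_items_congr _ _ (fun d x => by unfold pvClsAccp; split_ifs <;> rfl) _ _

lemma pv_case_accp (l : List String) :
    group_namespaces_by_suffix l "accp" = group_namespaces_by_suffix_alt l "accp" := by
  rw [pvA_accp]
  unfold group_namespaces_by_suffix_alt
  simp only [String.reduceBEq, Bool.false_eq_true, if_false]
  rw [pvInitB_eq, show pvEnvSuffixes.getD "accp" [] = ["accp", "accpb", "accpc"] from by decide]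
  simp [PySem.Dict.insert, PySem.Dict.contains, List.foldl]
  simp only [pvKeys, List.map]
  have z : ∀ k : String, ("accp" == k) = false → ("accpb" == k) = false → ("accpc" == k) = false → ("other" == k) = false →
      List.filter (fun ns => pvClsAccp ns == k) l = [] := by
    intro k a b c d
    refine List.filter_eq_nil_iff.mpr (fun ns _ => ?_)
    unfold pvClsAccp
    split_ifs <;> simp [a, b, c, d]
  have c1 : List.filter (fun ns => pvClsAccp ns == "accp") l
      = List.filter (fun ns => PySem.Str.endswith ns "accp") l := by
    refine List.filter_congr (fun ns _ => ?_)
    unfold pvClsAccp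
    split_ifs <;> simp_all
  have c2 : List.filter (fun ns => pvClsAccp ns == "accpb") l
      = List.filter (fun ns => PySem.Str.endswith ns "accpb") l := by
    refine List.filter_congr (fun ns _ => ?_)
    unfold pvClsAccp
    cases h1 : PySem.Str.endswith ns "accp" with
    | true =>
      have hx := pv_excl2 "accp" "accpb" (by decide) (by decide) (by decide) ns h1
      simp_all
    | false =>
      split_ifs <;> simp_all
  have c3 : List.filter (fun ns => pvClsAccp ns == "accpc") l
      = List.filter (fun ns => PySem.Str.endswith ns "accpc") l := by
    refine List.filter_congr (fun ns _ => ?_)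
    unfold pvClsAccp
    cases h1 : PySem.Str.endswith ns "accp" with
    | true =>
      have hx := pv_excl2 "accp" "accpc" (by decide) (by decide) (by decide) ns h1
      simp_all
    | false =>
      cases h2 : PySem.Str.endswith ns "accpb" with
      | true =>
        have hx := pv_excl2 "accpb" "accpc" (by decide) (by decide) (by decide) ns h2
        simp_all
      | false =>
        split_ifs <;> simp_all
  have co : List.filter (fun ns => pvClsAccp ns == "other") l
      = List.filter (fun ns => (!PySem.Str.endswith ns "accp" && (!PySem.Str.endswith ns "accpb" && !PySem.Str.endswith ns "accpc"))) l := by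
    refine List.filter_congr (fun ns _ => ?_)
    unfold pvClsAccp
    split_ifs <;> simp_all
  rw [c1, c2, c3, co, z "dev" (by decide) (by decide) (by decide) (by decide), z "devb" (by decide) (by decide) (by decide) (by decide), z "devc" (by decide) (by decide) (by decide) (by decide), z "intgb" (by decide) (by decide) (by decide) (by decide), z "intgc" (by decide) (by decide) (by decide) (by decide), z "proda" (by decide) (by decide) (by decide) (by decide), z "prodp" (by decide) (by decide) (by decide) (by decide), z "idev" (by decide) (by decide) (by decide) (by decide)]
  simp

lemma pvA_idev (l : List String) :
    group_namespaces_by_suffix l "idev"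
      = pvKeys.map (fun k => (k, l.filter (fun ns => ("idev" : String) == k))) := by
  unfold group_namespaces_by_suffix
  simp only [pvInitA_eq, String.reduceBEq, beq_self_eq_true, if_true, Bool.false_eq_true, if_false]
  refine Eq.trans (pv_foldl_items_congr _
    (fun d ns => d.modify ((fun _ => ("idev" : String)) ns) [] (· ++ [ns]))
    (fun d x => rfl) pvInit l) ?_
  exact pvA_char _ (fun ns => by decide) l

lemma pvA_default (l : List String) (env : String) (h1 : ¬ env = "dev") (h2 : ¬ env = "intg")
    (h3 : ¬ env = "prod") (h4 : ¬ env = "accp") (h5 : ¬ env = "idev") :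
    group_namespaces_by_suffix l env
      = pvKeys.map (fun k => (k, l.filter (fun ns => ("other" : String) == k))) := by
  unfold group_namespaces_by_suffix
  have b1 : (env == "dev") = false := by simp only [beq_eq_false_iff_ne]; exact h1
  have b2 : (env == "intg") = false := by simp only [beq_eq_false_iff_ne]; exact h2
  have b3 : (env == "prod") = false := by simp only [beq_eq_false_iff_ne]; exact h3
  have b4 : (env == "accp") = false := by simp only [beq_eq_false_iff_ne]; exact h4
  have b5 : (env == "idev") = false := by simp only [beq_eq_false_iff_ne]; exact h5
  simp only [pvInitA_eq, b1, b2, b3, b4, b5, Bool.false_eq_true, if_false]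
  refine Eq.trans (pv_foldl_items_congr _
    (fun d ns => d.modify ((fun _ => ("other" : String)) ns) [] (· ++ [ns]))
    (fun d x => rfl) pvInit l) ?_
  exact pvA_char _ (fun ns => by decide) l

lemma pv_case_idev (l : List String) :
    group_namespaces_by_suffix l "idev" = group_namespaces_by_suffix_alt l "idev" := by
  rw [pvA_idev]
  unfold group_namespaces_by_suffix_alt
  simp only [beq_self_eq_true, if_true]
  rw [pvInitB_eq]
  simp [PySem.Dict.insert, PySem.Dict.contains, pvKeys, List.map, List.filter_true]

lemma pvEnvSuffixes_eq_mk : pvEnvSuffixes = PySem.Dict.mk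
    [("dev", ["dev", "devb", "devc"]), ("intg", ["intgb", "intgc"]),
     ("prod", ["proda", "prodp"]), ("accp", ["accp", "accpb", "accpc"])] := by decide

lemma pv_case_default (l : List String) (env : String) (h1 : ¬ env = "dev") (h2 : ¬ env = "intg")
    (h3 : ¬ env = "prod") (h4 : ¬ env = "accp") (h5 : ¬ env = "idev") :
    group_namespaces_by_suffix l env = group_namespaces_by_suffix_alt l env := by
  have e1 : ("dev" == env) = false := by simp only [beq_eq_false_iff_ne]; exact Ne.symm h1
  have e2 : ("intg" == env) = false := by simp only [beq_eq_false_iff_ne]; exact Ne.symm h2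
  have e3 : ("prod" == env) = false := by simp only [beq_eq_false_iff_ne]; exact Ne.symm h3
  have e4 : ("accp" == env) = false := by simp only [beq_eq_false_iff_ne]; exact Ne.symm h4
  have b5 : (env == "idev") = false := by simp only [beq_eq_false_iff_ne]; exact h5
  have hs : pvEnvSuffixes.getD env [] = [] := by
    rw [pvEnvSuffixes_eq_mk]
    simp [PySem.Dict.getD, PySem.Dict.get?, List.find?, e1, e2, e3, e4]
  rw [pvA_default l env h1 h2 h3 h4 h5]
  unfold group_namespaces_by_suffix_alt
  simp only [b5, Bool.false_eq_true, if_false]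
  rw [pvInitB_eq, hs]
  simp [PySem.Dict.insert, PySem.Dict.contains, List.foldl, pvKeys, List.map, List.filter_true]

-- ===== VERDICT (by name: the statement is the Claim_ definition above) =====
theorem group_namespaces_by_suffix_spec : Claim_equal_group_namespaces_by_suffix := by
  intro namespaces env _
  show group_namespaces_by_suffix namespaces env = group_namespaces_by_suffix_alt namespaces env
  by_cases h1 : env = "dev"
  · subst h1; exact pv_case_dev namespaces
  by_cases h2 : env = "intg"
  · subst h2; exact pv_case_intg namespaces
  by_cases h3 : env = "prod"
  · subst h3; exact pv_case_prod namespaces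
  by_cases h4 : env = "accp"
  · subst h4; exact pv_case_accp namespaces
  by_cases h5 : env = "idev"
  · subst h5; exact pv_case_idev namespaces
  exact pv_case_default namespaces env h1 h2 h3 h4 h5
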